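-- pv_equiv track=rewrite | github.com/MakuIan/EPI | src/GPR/gpr_ue06_ex.py | unicode_strings
-- ===== SOURCE A (Python) =====
-- def unicode_strings(a: int, b: int) -> str:
--     code = ('\u2600', '\u2601', '\u2602', '\u2603', '\u2604',
--             '\u262E', '\u262F', '\u263A', '\u263B', '\u263C')
--     c = a + b
--
--     def my_decode(num: int) -> str:
--         s = ''
--         while (num > 0):
--             r = num % 10
--             num = num // 10
--             s = code[r] + s
--         return s
--
--     res = f'{my_decode(a)} + {my_decode(b)} = {my_decode(c)}'
--     return res
-- ===== SOURCE B (Python) =====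
-- def unicode_strings(a: int, b: int) -> str:
--     code = ('\u2600', '\u2601', '\u2602', '\u2603', '\u2604',
--             '\u262E', '\u262F', '\u263A', '\u263B', '\u263C')
--     c = a + b
--
--     def my_decode(num: int) -> str:
--         if num <= 0:
--             return ''
--         return ''.join(code[int(ch)] for ch in str(num))
--
--     return f'{my_decode(a)} + {my_decode(b)} = {my_decode(c)}'
-- ===== Notes on version B (the rewrite author's own statement) =====
-- stated objective: idiomatic
-- what changed: my_decode derives the digit symbols by iterating left-to-right over str(num) and joining, instead of extracting digits right-to-left with %/// and prepending to an accumulator.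
import Mathlib
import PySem

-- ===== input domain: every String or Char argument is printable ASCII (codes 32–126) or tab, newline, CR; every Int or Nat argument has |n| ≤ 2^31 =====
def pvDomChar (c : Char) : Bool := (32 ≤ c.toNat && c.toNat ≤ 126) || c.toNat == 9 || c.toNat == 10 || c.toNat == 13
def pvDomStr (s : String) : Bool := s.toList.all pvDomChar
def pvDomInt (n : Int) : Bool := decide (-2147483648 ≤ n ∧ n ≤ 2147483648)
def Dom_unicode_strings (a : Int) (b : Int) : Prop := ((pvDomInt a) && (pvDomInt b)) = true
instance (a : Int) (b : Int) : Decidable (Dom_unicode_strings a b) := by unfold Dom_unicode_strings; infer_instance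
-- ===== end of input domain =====

-- B renders each number by mapping the digit characters of str(num) (left-to-right, joined)
-- instead of A's right-to-left %10-//10 loop with string prepends: more idiomatic, same output.


-- ===== PORT A =====
-- the shared tuple constant `code` of both Pythons
def pvCode : List String := ["\u2600", "\u2601", "\u2602", "\u2603", "\u2604",
                             "\u262E", "\u262F", "\u263A", "\u263B", "\u263C"]

-- A's while loop: s starts as '' and each iteration prepends code[num % 10]
def pvMyDecode (num : Int) (s : String) : String :=
  if _h : num > 0 then
    pvMyDecode (PySem.Int.floordiv num 10) (PySem.List.pyGetD pvCode (PySem.Int.mod num 10) "" ++ s)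
  else s
termination_by num.toNat
decreasing_by
  have h10 : PySem.Int.floordiv num 10 = num / 10 := PySem.Int.floordiv_eq_ediv_of_pos (by omega)
  rw [h10]; omega

def unicode_strings (a : Int) (b : Int) : String :=
  let c := a + b
  pvMyDecode a "" ++ " + " ++ pvMyDecode b "" ++ " = " ++ pvMyDecode c ""

-- ===== PORT B =====
-- B's my_decode: '' for num <= 0, else join code[int(ch)] over the characters of str(num);
-- int(ch) is ported as ch.toNat - 48, exact for the digit characters str(num) yields.
def pvMyDecodeAlt (num : Int) : String :=
  if num ≤ 0 then "" else
    PySem.Str.join ""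
      ((PySem.Int.toChars num).map (fun ch => PySem.List.pyGetD pvCode ((ch.toNat : Int) - 48) ""))

def unicode_strings_alt (a : Int) (b : Int) : String :=
  let c := a + b
  pvMyDecodeAlt a ++ " + " ++ pvMyDecodeAlt b ++ " = " ++ pvMyDecodeAlt c

-- ===== PRECONDITION & SPEC =====
def Spec_unicode_strings (a : Int) (b : Int) (out : String) : Prop := out = unicode_strings_alt a b
instance (a : Int) (b : Int) (out : String) : Decidable (Spec_unicode_strings a b out) := by unfold Spec_unicode_strings; infer_instance

-- ===== CLAIM (what is proved, stated in full; the proofs are below) =====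
def Claim_equal_unicode_strings : Prop := ∀ (a : Int) (b : Int), Dom_unicode_strings a b → Spec_unicode_strings a b (unicode_strings a b)

-- ===== LEMMAS AND PROOFS =====

-- proof-only helpers: the symbol for a digit character, and A's accumulator as a fold
def pvG (c : Char) : String := PySem.List.pyGetD pvCode ((c.toNat : Int) - 48) ""
def pvJ (ds : List Char) : String := ds.foldr (fun c acc => pvG c ++ acc) ""

theorem pvCode_digit (r : Nat) (h : r < 10) :
    PySem.List.pyGetD pvCode (r : Int) "" = pvG (Nat.digitChar r) := by
  interval_cases r <;> rfl

theorem pvMyDecode_toDigitsCore (fuel : Nat) :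
    ∀ (n : Nat) (ds : List Char), 0 < n → n ≤ fuel →
      pvMyDecode (n : Int) (pvJ ds) = pvJ (Nat.toDigitsCore 10 fuel n ds) := by
  induction fuel with
  | zero => intro n ds h1 h2; omega
  | succ f ih =>
    intro n ds h1 h2
    rw [pvMyDecode]
    have hpos : (n : Int) > 0 := by exact_mod_cast h1
    rw [dif_pos hpos]
    have hfd : PySem.Int.floordiv (n : Int) 10 = ((n / 10 : Nat) : Int) :=
      PySem.Int.floordiv_natCast n 10
    have hmd : PySem.Int.mod (n : Int) 10 = ((n % 10 : Nat) : Int) :=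
      PySem.Int.mod_natCast n 10
    rw [hfd, hmd, pvCode_digit (n % 10) (Nat.mod_lt n (by omega))]
    have hacc : pvG (Nat.digitChar (n % 10)) ++ pvJ ds = pvJ (Nat.digitChar (n % 10) :: ds) := rfl
    rw [hacc]
    simp only [Nat.toDigitsCore]
    by_cases h0 : n / 10 = 0
    · rw [if_pos h0, h0]
      rw [pvMyDecode]
      norm_num
    · rw [if_neg h0]
      exact ih (n / 10) (Nat.digitChar (n % 10) :: ds) (Nat.pos_of_ne_zero h0) (by omega)

theorem pvIntercalate_nil (l : List (List Char)) : List.intercalate ([] : List Char) l = l.flatten := by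
  induction l with
  | nil => rfl
  | cons x ys ih =>
    cases ys with
    | nil => simp [List.intercalate]
    | cons y ys' =>
      simp only [List.intercalate, List.intersperse] at *
      simp_all

theorem pvJoin_map_g (ds : List Char) : PySem.Str.join "" (ds.map pvG) = pvJ ds := by
  have hnil : ("" : String).toList = [] := rfl
  induction ds with
  | nil => rfl
  | cons d rest ih =>
    simp only [PySem.Str.join, PySem.Chars.join, hnil, pvIntercalate_nil, List.map_cons,
      List.flatten_cons, String.ofList_append, String.ofList_toList] at ih ⊢
    rw [ih]
    rfl

theorem pvDecode_agree (n : Int) : pvMyDecode n "" = pvMyDecodeAlt n := by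
  by_cases h : 0 < n
  · have hn : n = ((n.toNat : Nat) : Int) := by omega
    have h1 : 0 < n.toNat := by omega
    unfold pvMyDecodeAlt
    rw [if_neg (by omega)]
    have htc : PySem.Int.toChars n = Nat.toDigits 10 n.toNat := by
      simp [PySem.Int.toChars, not_lt.mpr (le_of_lt h)]
    rw [htc]
    have : pvMyDecode n "" = pvJ (Nat.toDigits 10 n.toNat) := by
      rw [hn]
      exact pvMyDecode_toDigitsCore (n.toNat + 1) n.toNat [] h1 (by omega)
    rw [this, ← pvJoin_map_g]
    rfl
  · rw [pvMyDecode, dif_neg h]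
    unfold pvMyDecodeAlt
    rw [if_pos (by omega)]

-- ===== VERDICT (by name: the statement is the Claim_ definition above) =====
theorem unicode_strings_spec : Claim_equal_unicode_strings := by
  intro a b _
  unfold Spec_unicode_strings unicode_strings unicode_strings_alt
  simp only [pvDecode_agree]
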